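-- pv_equiv track=rewrite | github.com/tomarpremveer/Python-codes | recBac.py | countsumsubsetR
-- ===== SOURCE A (Python) =====
-- def countsumsubsetR(arr, n, i, s, x):
--     #function to find the count of the subset having sum equal to x and if number can be repeated
--     if i == n:
--         if s == x:
--             return 1
--         else:
--             return 0
--     if s==x:
--         return 1
--     if s > x:
--         return 0
--     else:
--         return countsumsubsetR(arr, n, i, s + arr[i], x) + countsumsubsetR(arr, n, i + 1, s, x)
-- ===== SOURCE B (Python) =====
-- def countsumsubsetR(arr, n, i, s, x):
--     # Bottom-up unbounded-knapsack DP over the remaining items arr[i:n]: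
--     # dp[t] = number of ways to add items (with repetition) to reach s + t = x.
--     if s == x:
--         return 1
--     if i == n or s > x:
--         return 0
--     target = x - s
--     dp = [1] + [0] * target
--     for a in reversed(arr[i:n]):
--         for t in range(a, target + 1):
--             dp[t] += dp[t - a]
--     return dp[target]
-- ===== Notes on version B (the rewrite author's own statement) =====
-- stated objective: alternative
-- what changed: Replaced the branching recursion (take-arr[i]-again vs move-to-next) by a bottom-up unbounded-knapsack DP table dp[0..x-s] built in one pass over arr[i:n].
-- outside the precondition, e.g. on countsumsubsetR([0, 2, 2, 6, 1], 0, -3, 1, 2): A returns 1, B returns 0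
import Mathlib
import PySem

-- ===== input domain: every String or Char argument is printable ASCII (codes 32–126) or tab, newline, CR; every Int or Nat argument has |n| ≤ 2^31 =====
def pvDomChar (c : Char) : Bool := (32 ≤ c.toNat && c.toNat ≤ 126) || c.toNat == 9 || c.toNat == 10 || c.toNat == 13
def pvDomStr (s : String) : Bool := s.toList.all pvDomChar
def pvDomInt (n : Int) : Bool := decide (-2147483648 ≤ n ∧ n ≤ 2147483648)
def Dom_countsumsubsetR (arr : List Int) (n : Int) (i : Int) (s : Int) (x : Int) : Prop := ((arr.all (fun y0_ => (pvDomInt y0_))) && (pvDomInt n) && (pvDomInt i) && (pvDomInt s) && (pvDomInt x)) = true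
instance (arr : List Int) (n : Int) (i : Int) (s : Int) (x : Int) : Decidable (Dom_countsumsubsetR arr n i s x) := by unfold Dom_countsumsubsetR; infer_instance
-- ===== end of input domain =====

-- B replaces A's branching recursion by a bottom-up unbounded-knapsack DP table over arr[i:n];
-- return values only, no side effects.

-- ===== PORT A =====
-- Literal port of A's recursion. The two dead `else 0` branches are totality guards only:
-- `none` is where Python raises IndexError, and `¬(0 < a ∧ i < n)` is where Python's
-- recursion never terminates — both lie outside Pre_countsumsubsetR.
def countsumsubsetR (arr : List Int) (n : Int) (i : Int) (s : Int) (x : Int) : Int :=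
  if i = n then (if s = x then 1 else 0)
  else if s = x then 1
  else if s > x then 0
  else
    match PySem.List.pyGet? arr i with
    | none => 0
    | some a =>
      if h : 0 < a ∧ i < n then
        countsumsubsetR arr n i (s + a) x + countsumsubsetR arr n (i + 1) s x
      else 0
termination_by ((x - s).toNat, (n - i).toNat)
decreasing_by
  · exact Prod.Lex.left _ _ (by omega)
  · exact Prod.Lex.right _ (by omega)

-- ===== PORT B =====
-- inner loop of Source B: `for t in range(a, target + 1): dp[t] += dp[t - a]`
def pvInner (target : Int) (dp : List Int) (a : Int) : List Int :=
  (PySem.List.pyRange a (target + 1) 1).foldl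
    (fun d t => PySem.List.pySetD d t (PySem.List.pyGetD d t 0 + PySem.List.pyGetD d (t - a) 0)) dp

def countsumsubsetR_alt (arr : List Int) (n : Int) (i : Int) (s : Int) (x : Int) : Int :=
  if s = x then 1
  else if i = n ∨ s > x then 0
  else
    let target := x - s
    let dp0 : List Int := 1 :: List.replicate target.toNat 0        -- [1] + [0]*target
    let dp := ((PySem.List.slice arr (some i) (some n)).reverse).foldl (pvInner target) dp0
    PySem.List.pyGetD dp target 0                                   -- dp[target]

-- ===== PRECONDITION & SPEC =====
-- Pre_ excludes the inputs where the Python A raises IndexError or never terminates, and the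
-- negative-i inputs on which A's value is an accident of Python's negative-index wraparound:
-- unless A returns in one of its three immediate base cases (s = x, s > x, i = n), it needs
-- 0 ≤ i < n ≤ len(arr) and every element of arr[i:n] positive.
def Pre_countsumsubsetR (arr : List Int) (n : Int) (i : Int) (s : Int) (x : Int) : Prop :=
  s = x ∨ s > x ∨ i = n ∨
    (0 ≤ i ∧ i < n ∧ n ≤ (arr.length : Int) ∧
      ∀ a ∈ PySem.List.slice arr (some i) (some n), 0 < a)
instance (arr : List Int) (n : Int) (i : Int) (s : Int) (x : Int) : Decidable (Pre_countsumsubsetR arr n i s x) := by unfold Pre_countsumsubsetR; infer_instance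

def pvWitness_countsumsubsetR : List Int × Int × Int × Int × Int := ([1, 2], 2, 0, 0, 4)

def Spec_countsumsubsetR (arr : List Int) (n : Int) (i : Int) (s : Int) (x : Int) (out : Int) : Prop := out = countsumsubsetR_alt arr n i s x
instance (arr : List Int) (n : Int) (i : Int) (s : Int) (x : Int) (out : Int) : Decidable (Spec_countsumsubsetR arr n i s x out) := by unfold Spec_countsumsubsetR; infer_instance

-- ===== CLAIM (what is proved, stated in full; the proofs are below) =====
def Claim_equal_countsumsubsetR : Prop := ∀ (arr : List Int) (n : Int) (i : Int) (s : Int) (x : Int), Dom_countsumsubsetR arr n i s x → Pre_countsumsubsetR arr n i s x → Spec_countsumsubsetR arr n i s x (countsumsubsetR arr n i s x)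

-- ===== LEMMAS AND PROOFS =====

-- pvF L t = number of multisets over L (items reusable) summing to t, peeling the head first
-- (the mathematical bridge both ports are proved equal to).
def pvF : List Int → Int → Int
  | [], t => if t = 0 then 1 else 0
  | a :: r, t =>
    if t = 0 then 1
    else if t < 0 then 0
    else if h : 0 < a then pvF (a :: r) (t - a) + pvF r t
    else 0
termination_by L t => (t.toNat, L.length)
decreasing_by
  all_goals simp only [List.length_cons]
  all_goals first
    | exact Prod.Lex.left _ _ (by omega)
    | exact Prod.Lex.right _ (by omega)

theorem pvF_zero (L : List Int) : pvF L 0 = 1 := by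
  cases L <;> (rw [pvF]; simp)

theorem pvF_neg (L : List Int) (t : Int) (ht : t < 0) : pvF L t = 0 := by
  cases L <;> (rw [pvF]; simp [show ¬ t = 0 by omega, ht])

theorem pvF_cons_lt (a : Int) (r : List Int) (t : Int)
    (ha : 0 < a) (ht0 : 0 ≤ t) (hta : t < a) : pvF (a :: r) t = pvF r t := by
  rw [pvF]
  by_cases h0 : t = 0
  · simp [h0, pvF_zero]
  · have : ¬ t < 0 := by omega
    simp [h0, this, ha, pvF_neg (a :: r) (t - a) (by omega)]

theorem pvF_cons_step (a : Int) (r : List Int) (t : Int)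
    (ha : 0 < a) (ht : 0 < t) : pvF (a :: r) t = pvF (a :: r) (t - a) + pvF r t := by
  rw [pvF]
  have h0 : ¬ t = 0 := by omega
  have h1 : ¬ t < 0 := by omega
  simp [h0, h1, ha]

theorem slice_nil_of_eq (arr : List Int) (i : Int) (h0 : 0 ≤ i) (hl : i ≤ (arr.length : Int)) :
    PySem.List.slice arr (some i) (some i) = [] := by
  rw [PySem.List.slice_of_nonneg arr h0 h0 hl hl]
  simp

theorem slice_cons (arr : List Int) (i n : Int) (h0 : 0 ≤ i) (hin : i < n)
    (hn : n ≤ (arr.length : Int)) :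
    ∃ hlt : i.toNat < arr.length,
      PySem.List.slice arr (some i) (some n)
        = arr[i.toNat] :: PySem.List.slice arr (some (i + 1)) (some n) := by
  have hlt : i.toNat < arr.length := by omega
  refine ⟨hlt, ?_⟩
  rw [PySem.List.slice_of_nonneg arr h0 (by omega) (by omega) hn,
    PySem.List.slice_of_nonneg arr (by omega) (by omega) (by omega) hn]
  rw [List.drop_eq_getElem_cons hlt]
  have h1 : (i + 1).toNat = i.toNat + 1 := by omega
  have h2 : n.toNat - i.toNat = (n.toNat - (i.toNat + 1)) + 1 := by omega
  rw [h1, h2, List.take_succ_cons]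

-- A equals pvF on its returning domain; single strong induction on the sum measure,
-- both recursive calls strictly decrease it.
theorem a_eq_pvF (N : ℕ) : ∀ (arr : List Int) (n i s x : Int),
    ((x - s).toNat + (n - i).toNat) ≤ N →
    0 ≤ i → i ≤ n → n ≤ (arr.length : Int) →
    (∀ a ∈ PySem.List.slice arr (some i) (some n), 0 < a) →
    countsumsubsetR arr n i s x = pvF (PySem.List.slice arr (some i) (some n)) (x - s) := by
  induction N with
  | zero =>
    intro arr n i s x hm h0 hin hn hpos
    -- measure 0 forces i = n
    have hni : i = n := by omega
    rw [countsumsubsetR, if_pos hni, hni,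
      slice_nil_of_eq arr n (by omega) (by omega), pvF]
    by_cases hsx : s = x <;> simp [hsx] <;> omega
  | succ N ih =>
    intro arr n i s x hm h0 hin hn hpos
    rw [countsumsubsetR]
    by_cases hieq : i = n
    · rw [if_pos hieq, hieq, slice_nil_of_eq arr n (by omega) (by omega), pvF]
      by_cases hsx : s = x <;> simp [hsx] <;> omega
    · simp only [if_neg hieq]
      by_cases hsx : s = x
      · simp [hsx, pvF_zero]
      · simp only [if_neg hsx]
        by_cases hgt : s > x
        · rw [if_pos hgt, pvF_neg _ _ (by omega)]
        · rw [if_neg hgt]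
          have hlt : i < n := lt_of_le_of_ne hin hieq
          obtain ⟨hidx, hsl⟩ := slice_cons arr i n h0 hlt hn
          have hget : PySem.List.pyGet? arr i = some arr[i.toNat] :=
            PySem.List.pyGet?_eq_some_getElem arr h0 (by omega)
          rw [hget]
          dsimp only
          have hapos : 0 < arr[i.toNat] := by
            apply hpos; rw [hsl]; exact List.mem_cons_self
          rw [dif_pos ⟨hapos, hlt⟩]
          have hsx' : s < x := by omega
          have ih1 : countsumsubsetR arr n i (s + arr[i.toNat]) x
              = pvF (PySem.List.slice arr (some i) (some n)) (x - (s + arr[i.toNat])) :=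
            ih arr n i (s + arr[i.toNat]) x (by omega) h0 hin hn hpos
          have hpos' : ∀ a ∈ PySem.List.slice arr (some (i + 1)) (some n), 0 < a := by
            intro a ha; apply hpos; rw [hsl]; exact List.mem_cons_of_mem _ ha
          have ih2 : countsumsubsetR arr n (i + 1) s x
              = pvF (PySem.List.slice arr (some (i + 1)) (some n)) (x - s) :=
            ih arr n (i + 1) s x (by omega) (by omega) (by omega) hn hpos'
          have heq : x - (s + arr[i.toNat]) = x - s - arr[i.toNat] := by ring
          have hstep := pvF_cons_step arr[i.toNat]
            (PySem.List.slice arr (some (i + 1)) (some n)) (x - s) hapos (by omega)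
          rw [ih1, ih2, hsl, heq, hstep]

theorem getD_set_eq_ite (l : List Int) (m j : ℕ) (v : Int) (hm : m < l.length) :
    (l.set m v).getD j 0 = if j = m then v else l.getD j 0 := by
  rw [List.getD_eq_getElem?_getD, List.getD_eq_getElem?_getD, List.getElem?_set]
  by_cases h : j = m
  · subst h; simp [hm]
  · have h' : ¬ (m = j) := fun hh => h hh.symm
    simp [h, h']

-- inner loop invariant: processing range(c, target+1) extends "dp[j] = pvF (a::r) j" from j < c to all j
theorem inner_loop (a : Int) (ha : 0 < a) (target : Int) (r : List Int) :
    ∀ (K : ℕ) (c : Int) (dp : List Int), a ≤ c →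
    (target + 1 - c).toNat ≤ K →
    (dp.length : Int) = target + 1 →
    (∀ j : ℕ, (j : Int) ≤ target → (j : Int) < c → dp.getD j 0 = pvF (a :: r) j) →
    (∀ j : ℕ, (j : Int) ≤ target → c ≤ (j : Int) → dp.getD j 0 = pvF r j) →
    (((PySem.List.pyRange c (target + 1) 1).foldl
        (fun d t => PySem.List.pySetD d t
          (PySem.List.pyGetD d t 0 + PySem.List.pyGetD d (t - a) 0)) dp).length : Int) = target + 1 ∧
    ∀ j : ℕ, (j : Int) ≤ target →
      ((PySem.List.pyRange c (target + 1) 1).foldl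
        (fun d t => PySem.List.pySetD d t
          (PySem.List.pyGetD d t 0 + PySem.List.pyGetD d (t - a) 0)) dp).getD j 0 = pvF (a :: r) j := by
  intro K
  induction K with
  | zero =>
    intro c dp hac hK hlen h1 _h2
    have hnil : PySem.List.pyRange c (target + 1) 1 = [] :=
      PySem.List.pyRange_one_eq_nil (by omega)
    rw [hnil]
    exact ⟨hlen, fun j hj => h1 j hj (by omega)⟩
  | succ K ihK =>
    intro c dp hac hK hlen h1 h2
    by_cases hend : target + 1 ≤ c
    · have hnil : PySem.List.pyRange c (target + 1) 1 = [] :=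
        PySem.List.pyRange_one_eq_nil hend
      rw [hnil]
      exact ⟨hlen, fun j hj => h1 j hj (by omega)⟩
    · have hc : c < target + 1 := by omega
      rw [PySem.List.pyRange_one_cons hc]
      simp only [List.foldl_cons]
      have hc0 : 0 ≤ c := by omega
      have hclen : c.toNat < dp.length := by omega
      -- evaluate the two reads
      have hrd1 : PySem.List.pyGetD dp c 0 = dp.getD c.toNat 0 := by
        rw [PySem.List.pyGetD_eq_getElem dp 0 hc0 (by omega)]
        rw [List.getD_eq_getElem?_getD, List.getElem?_eq_getElem hclen]
        rfl
      have hrd2 : PySem.List.pyGetD dp (c - a) 0 = dp.getD (c - a).toNat 0 := by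
        rw [PySem.List.pyGetD_eq_getElem dp 0 (by omega) (by omega)]
        rw [List.getD_eq_getElem?_getD, List.getElem?_eq_getElem (by omega)]
        rfl
      have hv1 : dp.getD c.toNat 0 = pvF r c := by
        have := h2 c.toNat (by omega) (by omega)
        rwa [Int.toNat_of_nonneg hc0] at this
      have hv2 : dp.getD (c - a).toNat 0 = pvF (a :: r) (c - a) := by
        have := h1 (c - a).toNat (by omega) (by omega)
        rwa [Int.toNat_of_nonneg (by omega)] at this
      have hset : PySem.List.pySetD dp c (PySem.List.pyGetD dp c 0 + PySem.List.pyGetD dp (c - a) 0)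
          = dp.set c.toNat (pvF r c + pvF (a :: r) (c - a)) := by
        rw [PySem.List.pySetD_of_nonneg dp _ hc0, hrd1, hrd2, hv1, hv2]
      rw [hset]
      have hval : pvF r c + pvF (a :: r) (c - a) = pvF (a :: r) c := by
        rw [pvF_cons_step a r c ha (by omega)]; ring
      apply ihK (c + 1) _ (by omega) (by omega) (by simp; omega)
      · intro j hj hjc
        rw [getD_set_eq_ite dp c.toNat j _ hclen]
        by_cases hje : j = c.toNat
        · subst hje
          rw [if_pos rfl, hval]
          congr 1
          omega
        · rw [if_neg hje]
          exact h1 j hj (by omega)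
      · intro j hj hjc
        rw [getD_set_eq_ite dp c.toNat j _ hclen, if_neg (by omega)]
        exact h2 j hj (by omega)

-- the whole inner loop, packaged at c = a
theorem pvInner_spec (a : Int) (ha : 0 < a) (target : Int) (r : List Int) (dp : List Int)
    (hlen : (dp.length : Int) = target + 1)
    (hdp : ∀ j : ℕ, (j : Int) ≤ target → dp.getD j 0 = pvF r j) :
    ((pvInner target dp a).length : Int) = target + 1 ∧
    ∀ j : ℕ, (j : Int) ≤ target → (pvInner target dp a).getD j 0 = pvF (a :: r) j := by
  unfold pvInner
  apply inner_loop a ha target r (target + 1 - a).toNat a dp (le_refl a) (le_refl _) hlen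
  · intro j hj hja
    rw [hdp j hj, pvF_cons_lt a r j ha (by omega) hja]
  · intro j hj _
    exact hdp j hj

-- outer loop: folding the reversed item list builds dp[j] = pvF L j
theorem outer_loop (target : Int) (ht : 0 ≤ target) :
    ∀ (L : List Int), (∀ a ∈ L, 0 < a) →
    ((L.foldr (fun a d => pvInner target d a)
        (1 :: List.replicate target.toNat 0)).length : Int) = target + 1 ∧
    ∀ j : ℕ, (j : Int) ≤ target →
      (L.foldr (fun a d => pvInner target d a)
        (1 :: List.replicate target.toNat 0)).getD j 0 = pvF L j := by
  intro L
  induction L with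
  | nil =>
    intro _
    constructor
    · simp; omega
    · intro j hj
      cases j with
      | zero => simp only [List.foldr_nil]; rw [pvF]; simp
      | succ k =>
        have hk : k < target.toNat := by omega
        simp only [List.foldr_nil]
        rw [List.getD_cons_succ, pvF]
        simp [List.getD_eq_getElem?_getD, List.getElem?_replicate, hk]
        omega
  | cons a L ihL =>
    intro hpos
    have ha : 0 < a := hpos a List.mem_cons_self
    have hL : ∀ b ∈ L, 0 < b := fun b hb => hpos b (List.mem_cons_of_mem a hb)
    obtain ⟨ihlen, ihval⟩ := ihL hL
    simp only [List.foldr_cons]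
    exact pvInner_spec a ha target L _ ihlen ihval

-- B's branch value equals pvF on the nontrivial case
theorem b_eq_pvF (arr : List Int) (n i s x : Int)
    (hsx : ¬ s = x) (hni : ¬ (i = n ∨ s > x))
    (hpos : ∀ a ∈ PySem.List.slice arr (some i) (some n), 0 < a) :
    countsumsubsetR_alt arr n i s x = pvF (PySem.List.slice arr (some i) (some n)) (x - s) := by
  have ht : 0 < x - s := by omega
  unfold countsumsubsetR_alt
  simp only [if_neg hsx, if_neg hni]
  rw [List.foldl_reverse]
  obtain ⟨hlen, hval⟩ := outer_loop (x - s) (by omega) (PySem.List.slice arr (some i) (some n)) hpos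
  set dp := (PySem.List.slice arr (some i) (some n)).foldr
      (fun a d => pvInner (x - s) d a) (1 :: List.replicate (x - s).toNat 0) with hdp
  have hv := hval (x - s).toNat (by omega)
  rw [Int.toNat_of_nonneg (by omega)] at hv
  have hlt' : (x - s).toNat < dp.length := by omega
  rw [PySem.List.pyGetD_eq_getElem dp 0 (by omega) (by omega)]
  rw [List.getD_eq_getElem?_getD, List.getElem?_eq_getElem hlt', Option.getD_some] at hv
  exact hv

-- ===== VERDICT (by name: the statement is the Claim_ definition above) =====
theorem countsumsubsetR_spec : Claim_equal_countsumsubsetR := by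
  intro arr n i s x _hdom hpre
  unfold Spec_countsumsubsetR
  by_cases hieq : i = n
  · rw [countsumsubsetR, if_pos hieq]
    by_cases hsx : s = x <;> simp [countsumsubsetR_alt, hieq, hsx]
  · by_cases hsx : s = x
    · rw [countsumsubsetR]
      simp [countsumsubsetR_alt, hieq, hsx]
    · by_cases hgt : s > x
      · rw [countsumsubsetR]
        simp [countsumsubsetR_alt, hieq, hsx, hgt]
      · rcases hpre with h | h | h | ⟨h0, hlt, hn, hpos⟩
        · exact absurd h hsx
        · exact absurd h hgt
        · exact absurd h hieq
        · rw [a_eq_pvF ((x - s).toNat + (n - i).toNat) arr n i s x (le_refl _) h0 (le_of_lt hlt) hn hpos]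
          rw [b_eq_pvF arr n i s x hsx (by omega) hpos]
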